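-- pv_equiv track=rewrite | github.com/melobyrro/Dev | home-server/scripts/filebot_other_status.py | parse_last_run_stats
-- ===== SOURCE A (Python) =====
-- def parse_last_run_stats(log_text):
--     if not log_text:
--         return 0, 0
--     lines = [line.rstrip("\n") for line in log_text.splitlines()]
--     last_start = None
--     for idx, line in enumerate(lines):
--         if line.startswith("Run script [fn:amc]"):
--             last_start = idx
--     if last_start is None:
--         return 0, 0
--     recent = lines[last_start:]
--     processed = sum(1 for line in recent if line.startswith("Processed "))
--     errors = sum(
--         1
--         for line in recent
--         if "ERROR" in line or "License Error" in line or "Bad License" in line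
--     )
--     return processed, errors
-- ===== SOURCE B (Python) =====
-- def parse_last_run_stats(log_text):
--     found = False
--     processed = 0
--     errors = 0
--     for line in log_text.splitlines():
--         if line.startswith("Run script [fn:amc]"):
--             found = True
--             processed = 0
--             errors = 0
--         if found:
--             if line.startswith("Processed "):
--                 processed += 1
--             if "ERROR" in line or "License Error" in line or "Bad License" in line:
--                 errors += 1
--     if not found:
--         return 0, 0
--     return processed, errors
-- ===== Notes on version B (the rewrite author's own statement) =====
-- stated objective: simpler
-- what changed: Replaces A's find-last-marker-index pass followed by a slice and two separate counting scans with one streaming pass that keeps (found, processed, errors) accumulators and resets them at every start-marker line.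
import Mathlib
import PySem

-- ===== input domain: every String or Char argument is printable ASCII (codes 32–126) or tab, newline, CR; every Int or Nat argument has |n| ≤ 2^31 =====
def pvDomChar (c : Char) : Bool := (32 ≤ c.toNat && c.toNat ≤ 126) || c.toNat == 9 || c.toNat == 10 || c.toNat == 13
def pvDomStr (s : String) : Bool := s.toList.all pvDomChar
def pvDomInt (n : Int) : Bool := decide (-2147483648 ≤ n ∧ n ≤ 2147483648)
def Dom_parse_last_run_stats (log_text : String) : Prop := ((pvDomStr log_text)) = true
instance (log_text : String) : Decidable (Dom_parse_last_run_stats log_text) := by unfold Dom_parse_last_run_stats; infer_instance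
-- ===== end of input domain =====

-- B replaces A's find-last-marker/slice/two-scan structure by one streaming pass with resettable accumulators (objective: simpler).

-- ===== PORT A =====
-- line.rstrip("\n"): drop trailing '\n' characters (hand port, exact)
def pvRstripNL (s : String) : String :=
  String.ofList ((s.toList.reverse.dropWhile (fun c => c == '\n')).reverse)

def parse_last_run_stats (log_text : String) : Int × Int :=
  if log_text = "" then (0, 0)
  else
    let lines := (PySem.Str.splitlines log_text).map pvRstripNL
    let last_start : Option Int :=
      (PySem.List.enumerate lines 0).foldl
        (fun acc p => if PySem.Str.startswith p.2 "Run script [fn:amc]" then some p.1 else acc) none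
    match last_start with
    | none => (0, 0)
    | some i =>
      let recent := PySem.List.slice lines (some i) none
      let processed : Int :=
        recent.foldl (fun a line => if PySem.Str.startswith line "Processed " then a + 1 else a) 0
      let errors : Int :=
        recent.foldl (fun a line =>
          if PySem.Str.isIn "ERROR" line || PySem.Str.isIn "License Error" line || PySem.Str.isIn "Bad License" line
          then a + 1 else a) 0
      (processed, errors)

-- ===== PORT B =====
def pvAltStep (st : Bool × Int × Int) (line : String) : Bool × Int × Int :=
  let st := if PySem.Str.startswith line "Run script [fn:amc]" then (true, (0 : Int), (0 : Int)) else st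
  if st.1 then
    let p := if PySem.Str.startswith line "Processed " then st.2.1 + 1 else st.2.1
    let e := if PySem.Str.isIn "ERROR" line || PySem.Str.isIn "License Error" line || PySem.Str.isIn "Bad License" line
             then st.2.2 + 1 else st.2.2
    (true, p, e)
  else st

def parse_last_run_stats_alt (log_text : String) : Int × Int :=
  let st := (PySem.Str.splitlines log_text).foldl pvAltStep (false, 0, 0)
  if st.1 then (st.2.1, st.2.2) else (0, 0)

-- ===== PRECONDITION & SPEC =====
def Spec_parse_last_run_stats (log_text : String) (out : Int × Int) : Prop := out = parse_last_run_stats_alt log_text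
instance (log_text : String) (out : Int × Int) : Decidable (Spec_parse_last_run_stats log_text out) := by unfold Spec_parse_last_run_stats; infer_instance

-- ===== CLAIM (what is proved, stated in full; the proofs are below) =====
def Claim_equal_parse_last_run_stats : Prop := ∀ (log_text : String), Dom_parse_last_run_stats log_text → Spec_parse_last_run_stats log_text (parse_last_run_stats log_text)

-- ===== LEMMAS AND PROOFS =====

-- the three line predicates, as B evaluates them
def pvMk (line : String) : Bool := PySem.Str.startswith line "Run script [fn:amc]"
def pvPr (line : String) : Bool := PySem.Str.startswith line "Processed "
def pvEr (line : String) : Bool :=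
  PySem.Str.isIn "ERROR" line || PySem.Str.isIn "License Error" line || PySem.Str.isIn "Bad License" line

-- the suffix of the line list starting at the LAST marker line (none if no marker)
def pvLastRec : List String → Option (List String)
  | [] => none
  | x :: xs =>
    match pvLastRec xs with
    | some r => some r
    | none => if pvMk x then some (x :: xs) else none

theorem pvLastRec_suffix : ∀ (ls r : List String), pvLastRec ls = some r →
    r.length ≤ ls.length ∧ ls.drop (ls.length - r.length) = r := by
  intro ls
  induction ls with
  | nil => intro r h; simp [pvLastRec] at h
  | cons x xs ih =>
    intro r h
    simp only [pvLastRec] at h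
    cases hx : pvLastRec xs with
    | some r' =>
      rw [hx] at h
      cases h
      obtain ⟨h1, h2⟩ := ih r hx
      constructor
      · simp; omega
      · have : (x :: xs).length - r.length = (xs.length - r.length) + 1 := by simp; omega
        rw [this, List.drop_succ_cons, h2]
    | none =>
      rw [hx] at h
      split_ifs at h
      cases h
      simp

theorem pvFoldCount (pred : String → Bool) : ∀ (l : List String) (a : Int),
    l.foldl (fun a line => if pred line then a + 1 else a) a = a + (l.countP pred : Int) := by
  intro l
  induction l with
  | nil => intro a; simp
  | cons x xs ih =>
    intro a
    simp only [List.foldl_cons, List.countP_cons, ih]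
    split_ifs <;> push_cast <;> ring

theorem pvEnumFold : ∀ (ls : List String) (s : Int) (acc : Option Int),
    (PySem.List.enumerate ls s).foldl
      (fun acc p => if PySem.Str.startswith p.2 "Run script [fn:amc]" then some p.1 else acc) acc =
    match pvLastRec ls with
    | some r => some (s + ((ls.length - r.length : Nat) : Int))
    | none => acc := by
  intro ls
  induction ls with
  | nil => intro s acc; simp [pvLastRec, PySem.List.enumerate_nil]
  | cons x xs ih =>
    intro s acc
    rw [PySem.List.enumerate_cons, List.foldl_cons]
    rw [ih]
    simp only [pvLastRec]
    cases hx : pvLastRec xs with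
    | some r =>
      obtain ⟨hlen, _⟩ := pvLastRec_suffix xs r hx
      have : ((x :: xs).length - r.length : Nat) = ((xs.length - r.length : Nat) + 1) := by
        simp; omega
      simp only [this]
      push_cast
      ring_nf
    | none =>
      by_cases hmk : pvMk x
      · simp [pvMk] at hmk
        simp [hmk, pvMk]
      · simp [pvMk] at hmk
        simp [hmk, pvMk]

theorem pvAltFold : ∀ (ls : List String) (b : Bool) (p e : Int),
    ls.foldl pvAltStep (b, p, e) =
    match pvLastRec ls with
    | some r => (true, (r.countP pvPr : Int), (r.countP pvEr : Int))
    | none => if b then (true, p + (ls.countP pvPr : Int), e + (ls.countP pvEr : Int)) else (b, p, e) := by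
  intro ls
  induction ls with
  | nil => intro b p e; cases b <;> simp [pvLastRec]
  | cons x xs ih =>
    intro b p e
    rw [List.foldl_cons]
    simp only [pvLastRec]
    cases hx : pvLastRec xs with
    | some r =>
      rcases h : pvAltStep (b, p, e) x with ⟨b', p', e'⟩
      rw [ih b' p' e', hx]
    | none =>
      by_cases hmk : pvMk x
      · have hstep : pvAltStep (b, p, e) x =
            (true, (if pvPr x then (1:Int) else 0), (if pvEr x then (1:Int) else 0)) := by
          simp only [pvAltStep, pvMk, pvPr, pvEr] at hmk ⊢
          rw [if_pos hmk, if_pos (show ((true, (0:Int), (0:Int)).1 = true) from rfl)]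
          split_ifs <;> norm_num
        rw [hstep, ih, hx, if_pos hmk]
        simp only [List.countP_cons, Prod.mk.injEq, if_true, true_and]
        constructor <;> (split_ifs <;> push_cast <;> ring)
      · have hstep : pvAltStep (b, p, e) x =
            if b then (true, p + (if pvPr x then (1:Int) else 0), e + (if pvEr x then (1:Int) else 0))
            else (b, p, e) := by
          simp only [pvAltStep, pvMk, pvPr, pvEr] at hmk ⊢
          rw [if_neg hmk]
          cases b with
          | false => simp
          | true =>
            simp only [if_true, Prod.mk.injEq, true_and]
            constructor <;> (split_ifs <;> ring)
        rw [hstep]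
        cases b with
        | false =>
          simp only [if_neg (Bool.false_ne_true)]
          rw [ih, hx]
          simp [hmk]
        | true =>
          simp only [if_true]
          rw [ih, hx, if_neg hmk]
          simp only [if_true, List.countP_cons, Prod.mk.injEq, true_and]
          constructor <;> (split_ifs <;> push_cast <;> ring)


-- removing one trailing character not in p preserves prefix/infix occurrence
theorem pvPrefixSnoc {p xs : List Char} {c : Char} (hc : c ∉ p) : p <+: xs ++ [c] ↔ p <+: xs := by
  constructor
  · rintro ⟨z, hz⟩
    rcases List.eq_nil_or_concat z with rfl | ⟨z', c', rfl⟩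
    · exfalso
      apply hc
      rw [List.append_nil] at hz
      rw [hz]
      simp
    · simp only [List.concat_eq_append] at hz
      rw [← List.append_assoc] at hz
      have h1 : p ++ z' = xs := by
        have := congrArg List.dropLast hz
        simpa using this
      exact ⟨z', h1⟩
  · intro h
    exact h.trans (List.prefix_append xs [c])

theorem pvInfixSnoc {p xs : List Char} {c : Char} (hc : c ∉ p) (hp : p ≠ []) :
    p <:+: xs ++ [c] ↔ p <:+: xs := by
  constructor
  · rintro ⟨s1, t1, h⟩
    rcases List.eq_nil_or_concat t1 with rfl | ⟨t', c', rfl⟩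
    · exfalso
      rw [List.append_nil] at h
      rcases List.eq_nil_or_concat p with rfl | ⟨p', d, rfl⟩
      · exact hp rfl
      · simp only [List.concat_eq_append] at h
        rw [← List.append_assoc] at h
        have hd : d = c := by
          have := congrArg List.getLast? h
          simpa using this
      
        apply hc
        rw [← hd]
        simp
    · simp only [List.concat_eq_append] at h
      have h1 : s1 ++ p ++ t' = xs := by
        have := congrArg List.dropLast h
        simpa using this
      exact ⟨s1, t', h1⟩
  · intro h
    exact h.trans ⟨[], [c], by simp⟩

theorem pvPrefixAppendNl {p a t : List Char} (ht : ∀ c ∈ t, c = '\n') (hc : '\n' ∉ p) :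
    p <+: a ++ t ↔ p <+: a := by
  induction t using List.reverseRecOn with
  | nil => simp
  | append_singleton t' c ih =>
    have hcn : c = '\n' := ht c (by simp)
    have hc' : c ∉ p := by rw [hcn]; exact hc
    rw [← List.append_assoc, pvPrefixSnoc hc']
    exact ih (fun d hd => ht d (by simp [hd]))

theorem pvInfixAppendNl {p a t : List Char} (ht : ∀ c ∈ t, c = '\n') (hc : '\n' ∉ p) (hp : p ≠ []) :
    p <:+: a ++ t ↔ p <:+: a := by
  induction t using List.reverseRecOn with
  | nil => simp
  | append_singleton t' c ih =>
    have hcn : c = '\n' := ht c (by simp)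
    have hc' : c ∉ p := by rw [hcn]; exact hc
    rw [← List.append_assoc, pvInfixSnoc hc' hp]
    exact ih (fun d hd => ht d (by simp [hd]))

theorem pvRstripDecomp (cs : List Char) :
    ∃ t, cs = (cs.reverse.dropWhile (fun c => c == '\n')).reverse ++ t ∧ ∀ c ∈ t, c = '\n' := by
  refine ⟨(cs.reverse.takeWhile (fun c => c == '\n')).reverse, ?_, ?_⟩
  · rw [← List.reverse_append, List.takeWhile_append_dropWhile, List.reverse_reverse]
  · intro c hcmem
    rw [List.mem_reverse] at hcmem
    have := List.mem_takeWhile_imp hcmem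
    simpa using this

-- prefix/infix tests against a '\n'-free nonempty pattern are unchanged by rstrip("\n")
theorem pvSW_rstrip (pat : String) (h : '\n' ∉ pat.toList) (line : String) :
    PySem.Str.startswith (pvRstripNL line) pat = PySem.Str.startswith line pat := by
  obtain ⟨t, hdec, ht⟩ := pvRstripDecomp line.toList
  have hl : (pvRstripNL line).toList = (line.toList.reverse.dropWhile (fun c => c == '\n')).reverse := by
    simp [pvRstripNL]
  rw [Bool.eq_iff_iff]
  simp only [PySem.Str.startswith_eq, PySem.Chars.startswith_iff]
  rw [hl]
  conv_rhs => rw [hdec]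
  exact (pvPrefixAppendNl ht h).symm

theorem pvIn_rstrip (sub : String) (h : '\n' ∉ sub.toList) (hne : sub.toList ≠ []) (line : String) :
    PySem.Str.isIn sub (pvRstripNL line) = PySem.Str.isIn sub line := by
  obtain ⟨t, hdec, ht⟩ := pvRstripDecomp line.toList
  have hl : (pvRstripNL line).toList = (line.toList.reverse.dropWhile (fun c => c == '\n')).reverse := by
    simp [pvRstripNL]
  rw [Bool.eq_iff_iff]
  rw [PySem.Str.isIn_iff_infix, PySem.Str.isIn_iff_infix]
  rw [hl]
  conv_rhs => rw [hdec]
  exact (pvInfixAppendNl ht h hne).symm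

theorem pvMk_rstrip (line : String) : pvMk (pvRstripNL line) = pvMk line := by
  exact pvSW_rstrip "Run script [fn:amc]" (by decide) line

theorem pvPr_rstrip (line : String) : pvPr (pvRstripNL line) = pvPr line := by
  exact pvSW_rstrip "Processed " (by decide) line

theorem pvEr_rstrip (line : String) : pvEr (pvRstripNL line) = pvEr line := by
  unfold pvEr
  rw [pvIn_rstrip "ERROR" (by decide) (by decide) line,
      pvIn_rstrip "License Error" (by decide) (by decide) line,
      pvIn_rstrip "Bad License" (by decide) (by decide) line]

theorem pvLastRec_map : ∀ (ls : List String),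
    pvLastRec (ls.map pvRstripNL) = (pvLastRec ls).map (List.map pvRstripNL) := by
  intro ls
  induction ls with
  | nil => simp [pvLastRec]
  | cons x xs ih =>
    simp only [List.map_cons, pvLastRec, ih]
    cases hx : pvLastRec xs with
    | some r => simp
    | none =>
      simp only [Option.map_none]
      rw [pvMk_rstrip x]
      by_cases hmk : pvMk x
      · simp [hmk]
      · simp [hmk]

theorem pvCountP_map (pred : String → Bool) (h : ∀ x, pred (pvRstripNL x) = pred x) (l : List String) :
    (l.map pvRstripNL).countP pred = l.countP pred := by
  rw [List.countP_map]
  exact List.countP_congr (fun x _ => by simp [Function.comp, h x])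

-- ===== VERDICT (by name: the statement is the Claim_ definition above) =====
theorem pvFoldP (l : List String) (a : Int) :
    l.foldl (fun a line => if PySem.Str.startswith line "Processed " then a + 1 else a) a
      = a + (l.countP pvPr : Int) :=
  pvFoldCount pvPr l a

theorem pvFoldE (l : List String) (a : Int) :
    l.foldl (fun a line =>
        if PySem.Str.isIn "ERROR" line || PySem.Str.isIn "License Error" line || PySem.Str.isIn "Bad License" line
        then a + 1 else a) a
      = a + (l.countP pvEr : Int) :=
  pvFoldCount pvEr l a

theorem parse_last_run_stats_spec : Claim_equal_parse_last_run_stats := by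
  unfold Claim_equal_parse_last_run_stats
  intro log_text _
  unfold Spec_parse_last_run_stats
  by_cases h0 : log_text = ""
  · subst h0; decide
  · simp only [parse_last_run_stats, parse_last_run_stats_alt, if_neg h0]
    rw [pvEnumFold, pvLastRec_map, pvAltFold]
    cases hx : pvLastRec (PySem.Str.splitlines log_text) with
    | none => simp
    | some r =>
      simp only [Option.map_some]
      obtain ⟨hlen, hdrop⟩ := pvLastRec_suffix _ _ hx
      have hkey : ((PySem.Str.splitlines log_text).map pvRstripNL).length - (r.map pvRstripNL).length
          = (PySem.Str.splitlines log_text).length - r.length := by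
        simp
      rw [hkey]
      have hz : (0 : Int) + (((PySem.Str.splitlines log_text).length - r.length : Nat) : Int)
          = (((PySem.Str.splitlines log_text).length - r.length : Nat) : Int) := by ring
      rw [hz, PySem.List.slice_from_natCast]
      rw [← List.map_drop, hdrop]
      rw [pvFoldP, pvFoldE]
      rw [pvCountP_map pvPr pvPr_rstrip, pvCountP_map pvEr pvEr_rstrip]
      simp
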